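-- pv_equiv track=rewrite | github.com/saurabhkaramankar/NPTEL-JoyofComputing-python- | Solutions/week8programming2.py | replaceV
-- ===== SOURCE A (Python) =====
-- def isvowel(ch):
--   v = 'AEIOUaeiou'
--   if ch in v:
--      return True
--   else:
--      return False
--
-- def replaceV(s):
--    n = len(s)
--    ans = ''
--    i=0
--    while(i<n-2):
--         if isvowel(s[i]) and isvowel(s[i+1]) and isvowel(s[i+2]):
--           ans = ans+'_'
--           i=i+3
--         else:
--           ans=ans+s[i]
--           i=i+1
--    return ans+s[i:]
-- ===== SOURCE B (Python) =====
-- VOWELS = set('AEIOUaeiou')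
--
-- def replaceV(s):
--     # Process maximal vowel runs: a run of k vowels becomes (k//3) underscores
--     # followed by the k%3 leftover vowels; non-vowels pass through.
--     parts = []
--     rest = s
--     while rest:
--         if rest[0] in VOWELS:
--             k = 1
--             while k < len(rest) and rest[k] in VOWELS:
--                 k += 1
--             parts.append('_' * (k // 3) + rest[k - k % 3:k])
--             rest = rest[k:]
--         else:
--             parts.append(rest[0])
--             rest = rest[1:]
--     return ''.join(parts)
-- ===== Notes on version B (the rewrite author's own statement) =====
-- stated objective: alternative
-- what changed: B replaces A's index-by-index while loop (checking a vowel triple at every position) by a run-based scan: it finds each maximal run of k consecutive vowels and emits k//3 underscores plus the k%3 leftover vowels at once, copying non-vowels through.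
import Mathlib
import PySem

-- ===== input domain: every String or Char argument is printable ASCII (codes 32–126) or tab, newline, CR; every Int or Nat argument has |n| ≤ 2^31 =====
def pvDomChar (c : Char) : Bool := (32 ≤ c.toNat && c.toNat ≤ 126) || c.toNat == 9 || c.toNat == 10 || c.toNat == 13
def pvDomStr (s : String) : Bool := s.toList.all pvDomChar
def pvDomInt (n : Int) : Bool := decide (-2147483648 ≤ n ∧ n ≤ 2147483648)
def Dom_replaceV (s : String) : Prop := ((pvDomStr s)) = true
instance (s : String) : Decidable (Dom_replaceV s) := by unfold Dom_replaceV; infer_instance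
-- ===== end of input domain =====

-- B replaces A's index-by-index while loop by a run-based scan: each maximal run of k
-- consecutive vowels becomes k/3 underscores plus the k%3 leftover vowels (alternative decomposition).

-- ===== PORT A =====
-- 'ch in v' for the one-char string s[i]
def isvowelA (ch : Char) : Bool :=
  if PySem.Chars.isIn [ch] "AEIOUaeiou".toList then true else false

-- the while loop of A: state (ans, i), scanning s by index
def replaceVA_loop (cs : List Char) (n : Int) (ans : List Char) (i : Int) : List Char :=
  if _h : i < n - 2 then
    if isvowelA (PySem.List.pyGetD cs i ' ') && isvowelA (PySem.List.pyGetD cs (i+1) ' ')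
        && isvowelA (PySem.List.pyGetD cs (i+2) ' ') then
      replaceVA_loop cs n (ans ++ ['_']) (i+3)
    else
      replaceVA_loop cs n (ans ++ [PySem.List.pyGetD cs i ' ']) (i+1)
  else
    ans ++ PySem.List.slice cs (some i) none
termination_by (n - 2 - i).toNat
decreasing_by all_goals omega

def replaceV (s : String) : String :=
  String.ofList (replaceVA_loop s.toList (PySem.Str.len s) [] 0)

-- ===== PORT B =====
-- 'rest[0] in VOWELS' (a set membership)
def isvowelB (c : Char) : Bool := "AEIOUaeiou".toList.contains c

-- outer while loop of B, on the remaining suffix; the inner counting loop is the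
-- takeWhile/dropWhile split of the leading vowel run
def replaceVB_go : List Char → List Char
  | [] => []
  | c :: rest =>
    if h : isvowelB c then
      let run := List.takeWhile isvowelB (c :: rest)
      let k := run.length
      List.replicate (k / 3) '_' ++ run.drop (k - k % 3)
        ++ replaceVB_go (List.dropWhile isvowelB (c :: rest))
    else
      c :: replaceVB_go rest
termination_by cs => cs.length
decreasing_by
  · have h2 : List.dropWhile isvowelB (c :: rest) = List.dropWhile isvowelB rest := by
      simp [List.dropWhile, h]
    have := List.length_dropWhile_le isvowelB rest
    simp [h2]; omega
  · simp

def replaceV_alt (s : String) : String := String.ofList (replaceVB_go s.toList)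

-- ===== PRECONDITION & SPEC =====
def Spec_replaceV (s : String) (out : String) : Prop := out = replaceV_alt s
instance (s : String) (out : String) : Decidable (Spec_replaceV s out) := by unfold Spec_replaceV; infer_instance

-- ===== CLAIM (what is proved, stated in full; the proofs are below) =====
def Claim_equal_replaceV : Prop := ∀ (s : String), Dom_replaceV s → Spec_replaceV s (replaceV s)

-- ===== LEMMAS AND PROOFS =====

-- reference recursion: A's scan expressed structurally on the remaining suffix
def fRef : List Char → List Char
  | a :: b :: c :: t =>
    if isvowelA a && isvowelA b && isvowelA c then '_' :: fRef t
    else a :: fRef (b :: c :: t)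
  | xs => xs

theorem isvowelB_eq_isvowelA (c : Char) : isvowelB c = isvowelA c := by
  unfold isvowelB isvowelA
  rw [Bool.eq_iff_iff]
  rw [show (if PySem.Chars.isIn [c] "AEIOUaeiou".toList then true else false)
        = PySem.Chars.isIn [c] "AEIOUaeiou".toList by split <;> simp_all]
  rw [PySem.Chars.isIn_iff_infix, List.singleton_infix_iff, List.contains_iff_mem]

theorem fRef_short (xs : List Char) (h : xs.length < 3) : fRef xs = xs := by
  match xs, h with
  | [], _ => rfl
  | [a], _ => rfl
  | [a, b], _ => rfl

theorem fRef_cons_not_vowel (a : Char) (t : List Char) (h : isvowelA a = false) :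
    fRef (a :: t) = a :: fRef t := by
  match t with
  | [] => rfl
  | [b] => rfl
  | b :: c :: t' => simp [fRef, h]

-- A's loop equals ans ++ fRef (remaining suffix)
theorem replaceVA_loop_eq (cs : List Char) (m : Nat) : ∀ (ans : List Char) (i : Int),
    ((cs.length : Int) - 2 - i).toNat = m → 0 ≤ i → i ≤ cs.length →
    replaceVA_loop cs (cs.length : Int) ans i = ans ++ fRef (cs.drop i.toNat) := by
  induction m using Nat.strong_induction_on with
  | _ m IH =>
    intro ans i hm h0 h1
    rw [replaceVA_loop]
    split
    · rename_i hlt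
      have hi0 : i.toNat < cs.length := by omega
      have hi1 : i.toNat + 1 < cs.length := by omega
      have hi2 : i.toNat + 2 < cs.length := by omega
      have hd0 : cs.drop i.toNat = cs[i.toNat] :: cs.drop (i.toNat + 1) :=
        List.drop_eq_getElem_cons hi0
      have hd1 : cs.drop (i.toNat + 1) = cs[i.toNat + 1] :: cs.drop (i.toNat + 2) :=
        List.drop_eq_getElem_cons hi1
      have hd2 : cs.drop (i.toNat + 2) = cs[i.toNat + 2] :: cs.drop (i.toNat + 3) :=
        List.drop_eq_getElem_cons hi2
      have hg0 : PySem.List.pyGetD cs i ' ' = cs[i.toNat] :=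
        PySem.List.pyGetD_eq_getElem cs ' ' h0 (by omega)
      have hg1 : PySem.List.pyGetD cs (i+1) ' ' = cs[i.toNat + 1] := by
        rw [PySem.List.pyGetD_eq_getElem cs ' ' (by omega) (by omega)]
        congr 1; omega
      have hg2 : PySem.List.pyGetD cs (i+2) ' ' = cs[i.toNat + 2] := by
        rw [PySem.List.pyGetD_eq_getElem cs ' ' (by omega) (by omega)]
        congr 1; omega
      rw [hg0, hg1, hg2]
      split
      · rename_i hvow
        rw [IH (((cs.length : Int) - 2 - (i+3)).toNat) (by omega) _ _ rfl (by omega) (by omega)]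
        have : (i+3).toNat = i.toNat + 3 := by omega
        rw [this, hd0, hd1, hd2]
        simp [fRef, hvow]
      · rename_i hvow
        rw [IH (((cs.length : Int) - 2 - (i+1)).toNat) (by omega) _ _ rfl (by omega) (by omega)]
        have : (i+1).toNat = i.toNat + 1 := by omega
        rw [this, hd0, hd1, hd2]
        simp only [fRef, Bool.and_eq_true] at *
        rw [if_neg (by simpa using hvow)]
        simp
    · rename_i hge
      rw [PySem.List.slice_from cs h0, fRef_short _ (by simp; omega)]

-- a leading vowel run of length < 3 is copied through by fRef
theorem fRef_take_small (cs : List Char) (h : (List.takeWhile isvowelA cs).length < 3) :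
    fRef cs = List.takeWhile isvowelA cs ++ fRef (List.dropWhile isvowelA cs) := by
  match cs with
  | [] => rfl
  | a :: t =>
    rcases ha : isvowelA a with _ | _
    · simp [List.takeWhile, List.dropWhile, ha]
    · match t with
      | [] => simp [fRef, List.takeWhile, List.dropWhile, ha]
      | b :: t2 =>
        rcases hb : isvowelA b with _ | _
        · match t2 with
          | [] => simp [fRef, List.takeWhile, List.dropWhile, ha, hb]
          | c :: t3 => simp [fRef, List.takeWhile, List.dropWhile, ha, hb]
        · match t2 with
          | [] => simp [fRef, List.takeWhile, List.dropWhile, ha, hb]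
          | c :: t3 =>
            rcases hc : isvowelA c with _ | _
            · simp [List.takeWhile, List.dropWhile, ha, hb, hc]
              cases t3 <;> simp [fRef, ha, hb, hc]
            · simp [List.takeWhile, ha, hb, hc] at h
              omega

-- run lemma: fRef on a leading vowel run of length k
theorem fRef_run (cs : List Char) :
    fRef cs = List.replicate ((List.takeWhile isvowelA cs).length / 3) '_'
      ++ (List.takeWhile isvowelA cs).drop
           ((List.takeWhile isvowelA cs).length - (List.takeWhile isvowelA cs).length % 3)
      ++ fRef (List.dropWhile isvowelA cs) := by
  by_cases h : (List.takeWhile isvowelA cs).length < 3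
  · have hk0 : (List.takeWhile isvowelA cs).length / 3 = 0 := by omega
    have hk1 : (List.takeWhile isvowelA cs).length - (List.takeWhile isvowelA cs).length % 3 = 0 := by omega
    rw [hk0, hk1, List.replicate_zero, List.drop_zero, List.nil_append]
    exact fRef_take_small cs h
  · match cs with
    | [] => simp at h
    | [a] => simp [List.takeWhile] at h; split at h <;> simp_all
    | [a, b] =>
      exfalso
      have : (List.takeWhile isvowelA [a, b]).length ≤ 2 := by
        have := (List.takeWhile_sublist (l := [a, b]) isvowelA).length_le
        simpa using this
      omega
    | a :: b :: c :: t =>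
      have ha : isvowelA a = true := by
        by_contra hx
        simp [List.takeWhile, Bool.not_eq_true] at hx
        simp [List.takeWhile, hx] at h
      have hb : isvowelA b = true := by
        by_contra hx
        simp [Bool.not_eq_true] at hx
        simp [List.takeWhile, ha, hx] at h
      have hc : isvowelA c = true := by
        by_contra hx
        simp [Bool.not_eq_true] at hx
        simp [List.takeWhile, ha, hb, hx] at h
      have htw : List.takeWhile isvowelA (a :: b :: c :: t)
          = a :: b :: c :: List.takeWhile isvowelA t := by
        simp [List.takeWhile, ha, hb, hc]
      have hdw : List.dropWhile isvowelA (a :: b :: c :: t) = List.dropWhile isvowelA t := by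
        simp [List.dropWhile, ha, hb, hc]
      have hf : fRef (a :: b :: c :: t) = '_' :: fRef t := by
        simp [fRef, ha, hb, hc]
      rw [hf, htw, hdw, fRef_run t]
      have h6 : (a :: b :: c :: List.takeWhile isvowelA t).length
          = (List.takeWhile isvowelA t).length + 3 := by simp
      rw [h6]
      rw [show ((List.takeWhile isvowelA t).length + 3) / 3
            = (List.takeWhile isvowelA t).length / 3 + 1 by omega,
          show (List.takeWhile isvowelA t).length + 3
              - ((List.takeWhile isvowelA t).length + 3) % 3
            = ((List.takeWhile isvowelA t).length
                - (List.takeWhile isvowelA t).length % 3) + 1 + 1 + 1 by omega]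
      simp [List.replicate_succ, List.drop_succ_cons]
termination_by cs.length
decreasing_by simp; omega

theorem replaceVB_go_eq (cs : List Char) : replaceVB_go cs = fRef cs := by
  have hv : isvowelB = isvowelA := funext isvowelB_eq_isvowelA
  match cs with
  | [] => rw [replaceVB_go]; rfl
  | c :: rest =>
    rw [replaceVB_go]
    split
    · rename_i h
      have hd : (List.dropWhile isvowelB (c :: rest)).length < (c :: rest).length := by
        have h2 : List.dropWhile isvowelB (c :: rest) = List.dropWhile isvowelB rest := by
          simp [List.dropWhile, h]
        have := List.length_dropWhile_le isvowelB rest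
        simp [h2]; omega
      rw [replaceVB_go_eq (List.dropWhile isvowelB (c :: rest))]
      rw [hv]
      exact (fRef_run (c :: rest)).symm
    · rename_i h
      rw [replaceVB_go_eq rest,
        fRef_cons_not_vowel c rest (by rw [← isvowelB_eq_isvowelA]; simpa using h)]
termination_by cs.length
decreasing_by
  all_goals first
    | exact hd
    | simp

-- ===== VERDICT (by name: the statement is the Claim_ definition above) =====
theorem replaceV_spec : Claim_equal_replaceV := by
  intro s _
  unfold Spec_replaceV replaceV replaceV_alt
  rw [replaceVB_go_eq]
  have : PySem.Str.len s = (s.toList.length : Int) := by simp [pysem]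
  rw [this, replaceVA_loop_eq s.toList _ [] 0 rfl (by omega) (by omega)]
  simp
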